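-- pv_equiv track=rewrite | github.com/munhyunsu/domjudge_scoring | main.py | calc
-- ===== SOURCE A (Python) =====
-- def calc(score, base, deadline):
--     result = list()
--     for s, b, d in zip(score, base, deadline):
--         if s < 0:
--             result.append('')
--             continue
--         if s > max(d.keys()):
--             result.append('=0')
--             continue
--         for k, v in sorted(d.items()):
--             if s <= k:
--                 result.append(f'={b}*{v}')
--                 break
--     return result
-- ===== SOURCE B (Python) =====
-- def _bisect_left(a, x):
--     lo, hi = 0, len(a)
--     while lo < hi:
--         mid = (lo + hi) // 2
--         if a[mid] < x:
--             lo = mid + 1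
--         else:
--             hi = mid
--     return lo
--
--
-- def _bracket(s, b, d):
--     if s < 0:
--         return ''
--     if s > max(d.keys()):
--         return '=0'
--     keys = sorted(d)
--     return f'={b}*{d[keys[_bisect_left(keys, s)]]}'
--
--
-- def calc(score, base, deadline):
--     return [_bracket(s, b, d) for s, b, d in zip(score, base, deadline)]
-- ===== Notes on version B (the rewrite author's own statement) =====
-- stated objective: alternative
-- what changed: A's single loop that appends after a linear first-match scan over sorted (key,value) items becomes a map over a per-element helper that binary-searches (hand-written bisect_left) the sorted key list for the first threshold >= s and then looks the value up in the dict.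
import Mathlib
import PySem

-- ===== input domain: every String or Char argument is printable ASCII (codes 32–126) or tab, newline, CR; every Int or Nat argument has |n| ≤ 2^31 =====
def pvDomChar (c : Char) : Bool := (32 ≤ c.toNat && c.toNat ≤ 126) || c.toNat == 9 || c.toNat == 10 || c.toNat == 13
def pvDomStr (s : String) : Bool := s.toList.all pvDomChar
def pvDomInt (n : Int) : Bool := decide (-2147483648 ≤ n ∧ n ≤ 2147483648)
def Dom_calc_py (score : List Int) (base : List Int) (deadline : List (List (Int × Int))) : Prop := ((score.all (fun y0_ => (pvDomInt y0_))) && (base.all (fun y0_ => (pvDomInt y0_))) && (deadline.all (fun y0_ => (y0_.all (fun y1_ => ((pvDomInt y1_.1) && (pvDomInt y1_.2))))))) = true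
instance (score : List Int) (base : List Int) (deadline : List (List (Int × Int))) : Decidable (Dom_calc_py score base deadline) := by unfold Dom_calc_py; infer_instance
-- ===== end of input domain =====

-- B replaces A's linear first-match scan over sorted items with a map over a helper
-- that binary-searches the sorted key list (alternative decomposition, no speed claim).

-- ===== PORT A =====
-- f'={b}*{v}'
def pyFmt (b v : Int) : String := "=" ++ PySem.Int.toStr b ++ "*" ++ PySem.Int.toStr v

-- A's inner loop: first (k, v) in the sorted items with s <= k (appends one string, or none)
def calcScan (s b : Int) : List (Int × Int) → List String
  | [] => []
  | (k, v) :: rest => if s ≤ k then [pyFmt b v] else calcScan s b rest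

-- A's loop body for one zipped triple (s, (b, d))
def calcStep (result : List String) (t : Int × Int × List (Int × Int)) : List String :=
  let s := t.1
  let b := t.2.1
  let d := PySem.Dict.ofList t.2.2
  if s < 0 then result ++ [""]
  else
    match PySem.List.max? d.keys (fun k => k) with
    | none => result   -- Python: max() on an empty dict raises ValueError; excluded by Pre_
    | some m =>
      if s > m then result ++ ["=0"]
      -- sorted(d.items()) sorts pairs lexicographically: sorted2 with keys fst, snd
      else result ++ calcScan s b (PySem.List.sorted2 d.items (fun p => p.1) (fun p => p.2))

def calc_py (score : List Int) (base : List Int) (deadline : List (List (Int × Int))) : List String :=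
  (score.zip (base.zip deadline)).foldl calcStep []

-- ===== PORT B =====
-- _bisect_left is the classic binary search; PySem.List.bisectLeft is that very loop
def calcBracket (s b : Int) (d : PySem.Dict Int Int) : String :=
  if s < 0 then ""
  else
    match PySem.List.max? d.keys (fun k => k) with
    | none => ""   -- Python: max() on an empty dict raises ValueError; excluded by Pre_
    | some m =>
      if s > m then "=0"
      else
        let keys := PySem.List.sorted d.keys (fun k => k)
        -- keys[i] is in range and the key is present whenever s <= max(keys)
        pyFmt b (d.getD (keys.getD (PySem.List.bisectLeft keys s) 0) 0)

def calc_py_alt (score : List Int) (base : List Int) (deadline : List (List (Int × Int))) : List String :=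
  (score.zip (base.zip deadline)).map (fun t => calcBracket t.1 t.2.1 (PySem.Dict.ofList t.2.2))

-- ===== PRECONDITION & SPEC =====
-- Pre_ excludes exactly the triples with a nonnegative score and an empty deadline dict,
-- where A (and B alike) raises ValueError at max() on the empty key sequence.
def Pre_calc_py (score : List Int) (base : List Int) (deadline : List (List (Int × Int))) : Prop :=
  ∀ t ∈ score.zip (base.zip deadline), t.1 < 0 ∨ t.2.2 ≠ []
instance (score : List Int) (base : List Int) (deadline : List (List (Int × Int))) : Decidable (Pre_calc_py score base deadline) := by unfold Pre_calc_py; infer_instance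

def pvWitness_calc_py : List Int × List Int × (List (List (Int × Int))) :=
  ([1, -3], [10, 2], [[(5, 7), (2, 9)], []])

def Spec_calc_py (score : List Int) (base : List Int) (deadline : List (List (Int × Int))) (out : List String) : Prop := out = calc_py_alt score base deadline
instance (score : List Int) (base : List Int) (deadline : List (List (Int × Int))) (out : List String) : Decidable (Spec_calc_py score base deadline out) := by unfold Spec_calc_py; infer_instance

-- ===== CLAIM (what is proved, stated in full; the proofs are below) =====
def Claim_equal_calc_py : Prop := ∀ (score : List Int) (base : List Int) (deadline : List (List (Int × Int))), Dom_calc_py score base deadline → Pre_calc_py score base deadline → Spec_calc_py score base deadline (calc_py score base deadline)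

-- ===== LEMMAS AND PROOFS =====

theorem insertBy_congr {α : Type} (R S : α → α → Bool) (x : α) (acc : List α)
    (h : ∀ b ∈ acc, R x b = S x b) :
    PySem.List.insertBy R x acc = PySem.List.insertBy S x acc := by
  induction acc with
  | nil => rfl
  | cons y ys ih =>
    simp only [PySem.List.insertBy]
    rw [h y (by simp)]
    by_cases hc : S x y = true
    · simp [hc]
    · simp [hc, ih (fun b hb => h b (by simp [hb]))]

theorem foldl_insertBy_congr {α : Type} (R S : α → α → Bool) (P : α → Prop)
    (h : ∀ a b, P a → P b → R a b = S a b) :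
    ∀ (xs acc : List α), (∀ a ∈ xs, P a) → (∀ a ∈ acc, P a) →
    xs.foldl (fun acc x => PySem.List.insertBy R x acc) acc
      = xs.foldl (fun acc x => PySem.List.insertBy S x acc) acc := by
  intro xs
  induction xs with
  | nil => intro acc _ _; rfl
  | cons x t ih =>
    intro acc hxs hacc
    simp only [List.foldl_cons]
    rw [insertBy_congr R S x acc (fun b hb => h x b (hxs x (by simp)) (hacc b hb))]
    exact ih _ (fun a ha => hxs a (by simp [ha]))
      (fun a ha => by
        rcases (PySem.List.mem_insertBy S x a acc).mp ha with rfl | ha'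
        · exact hxs a (by simp)
        · exact hacc a ha')

-- dict keys are Nodup, so fst is injective on the items list
theorem items_fst_inj {d : PySem.Dict Int Int} (hnd : d.keys.Nodup)
    {a b : Int × Int} (ha : a ∈ d.items) (hb : b ∈ d.items) (hfst : a.1 = b.1) : a = b := by
  obtain ⟨a1, a2⟩ := a; obtain ⟨b1, b2⟩ := b
  simp only at hfst; subst hfst
  have h1 := PySem.Dict.get?_of_mem_items (d := d) ha hnd
  have h2 := PySem.Dict.get?_of_mem_items (d := d) hb hnd
  rw [h1] at h2
  simp at h2; simp [h2]

-- Python's sorted(d.items()) (lexicographic pair order) is the sort by key, keys being distinct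
theorem sorted2_items_eq_sorted {d : PySem.Dict Int Int} (hnd : d.keys.Nodup) :
    PySem.List.sorted2 d.items (fun p => p.1) (fun p => p.2)
      = PySem.List.sorted d.items (fun p => p.1) := by
  rw [PySem.List.sorted_eq_foldl_insertBy]
  simp only [PySem.List.sorted2]
  apply foldl_insertBy_congr _ _ (fun a => a ∈ d.items)
  · intro a b ha hb
    by_cases hab : a = b
    · subst hab; simp
    · have hne : a.1 ≠ b.1 := fun he => hab (items_fst_inj hnd ha hb he)
      rcases lt_or_gt_of_ne hne with hlt | hgt
      · simp [hlt]
      · simp [hgt, not_lt_of_gt hgt]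
  · intro a ha; exact ha
  · intro a ha; simp at ha

-- the scan returns the element at the first index whose key is ≥ s
theorem calcScan_at_index (s b : Int) :
    ∀ (l : List (Int × Int)) (i : Nat) (hi : i < l.length),
    (∀ j (hj : j < l.length), j < i → l[j].1 < s) → s ≤ l[i].1 →
    calcScan s b l = [pyFmt b l[i].2] := by
  intro l
  induction l with
  | nil => intro i hi; simp at hi
  | cons p t ih =>
    intro i hi hlt hge
    obtain ⟨k, v⟩ := p
    cases i with
    | zero =>
      simp only [List.getElem_cons_zero] at hge
      simp [calcScan, hge]
    | succ n =>
      have hk : k < s := by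
        have := hlt 0 (by simp) (Nat.succ_pos n)
        simpa using this
      simp only [calcScan, if_neg (not_le.mpr hk)]
      have hn : n < t.length := by simpa using hi
      refine ih n hn ?_ ?_
      · intro j hj hjn
        have := hlt (j + 1) (by simpa using Nat.succ_lt_succ hj) (Nat.succ_lt_succ hjn)
        simpa using this
      · simpa using hge

-- the keys of the sorted items list are the sorted keys
theorem map_fst_sorted_items {d : PySem.Dict Int Int} (hnd : d.keys.Nodup) :
    PySem.List.sorted d.keys (fun k => k)
      = (PySem.List.sorted d.items (fun p => p.1)).map (fun p => p.1) := by
  apply PySem.List.sorted_eq_of_perm_of_pairwise_lt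
  · have hperm : (PySem.List.sorted d.items (fun p => p.1)).Perm d.items :=
      PySem.List.sorted_perm _ _ _
    have := hperm.map (fun p => p.1)
    simpa [PySem.Dict.keys] using this
  · have hle : (PySem.List.sorted d.items (fun p => p.1)).Pairwise (fun a b => a.1 ≤ b.1) :=
      PySem.List.sorted_pairwise _ _
    have hnd' : ((PySem.List.sorted d.items (fun p => p.1)).map (fun p => p.1)).Nodup := by
      have hperm : (PySem.List.sorted d.items (fun p => p.1)).Perm d.items :=
        PySem.List.sorted_perm _ _ _
      exact ((hperm.map (fun p => p.1)).nodup_iff).mpr (by simpa [PySem.Dict.keys] using hnd)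
    have hne : (PySem.List.sorted d.items (fun p => p.1)).Pairwise (fun a b => a.1 ≠ b.1) := by
      rw [List.nodup_iff_pairwise_ne, List.pairwise_map] at hnd'
      exact hnd'
    rw [List.pairwise_map]
    exact (hle.and hne).imp (fun h => lt_of_le_of_ne h.1 h.2)

-- the core: A's sorted-items scan equals B's binary-search lookup
theorem scan_eq_bracket (s b : Int) (pairs : List (Int × Int)) (m : Int)
    (hmax : PySem.List.max? (PySem.Dict.ofList pairs).keys (fun k => k) = some m)
    (hs : s ≤ m) :
    calcScan s b (PySem.List.sorted2 (PySem.Dict.ofList pairs).items (fun p => p.1) (fun p => p.2))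
      = [pyFmt b ((PySem.Dict.ofList pairs).getD
          ((PySem.List.sorted (PySem.Dict.ofList pairs).keys (fun k => k)).getD
            (PySem.List.bisectLeft (PySem.List.sorted (PySem.Dict.ofList pairs).keys (fun k => k)) s) 0) 0)] := by
  set d := PySem.Dict.ofList pairs with hd
  have hnd : d.keys.Nodup := PySem.Dict.nodup_keys_ofList pairs
  set sl := PySem.List.sorted d.items (fun p => p.1) with hsl
  set keys := PySem.List.sorted d.keys (fun k => k) with hkeys
  have hmap : keys = sl.map (fun p => p.1) := map_fst_sorted_items hnd
  have hpw : keys.Pairwise (fun a b => a ≤ b) := by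
    have := PySem.List.sorted_pairwise d.keys (fun k => k)
    simpa [hkeys] using this
  obtain ⟨hle, hbelow, habove⟩ := PySem.List.bisectLeft_spec keys s hpw
  set i := PySem.List.bisectLeft keys s with hi
  -- i is a genuine index: m ∈ keys and s ≤ m
  have hmem : m ∈ keys := by
    rw [hkeys, PySem.List.mem_sorted]
    exact PySem.List.max?_mem hmax
  have hilt : i < keys.length := by
    rcases Nat.lt_or_ge i keys.length with h | h
    · exact h
    · exfalso
      obtain ⟨j, hj, hje⟩ := List.mem_iff_getElem.mp hmem
      have := hbelow j hj (Nat.lt_of_lt_of_le hj h)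
      rw [hje] at this
      exact absurd hs (not_le.mpr this)
  have hlen : keys.length = sl.length := by rw [hmap]; simp
  have hislt : i < sl.length := hlen ▸ hilt
  have hkeq : ∀ j (hj : j < keys.length), keys[j] = (sl[j]'(hlen ▸ hj)).1 := by
    intro j hj
    have : keys[j] = (sl.map (fun p => p.1))[j]'(by simpa [hmap] using hj) := by
      congr 1 <;> rw [hmap]
    simpa using this
  rw [sorted2_items_eq_sorted hnd, ← hsl]
  rw [calcScan_at_index s b sl i hislt ?_ ?_]
  · -- the two selected values agree
    have hgetD : keys.getD i 0 = keys[i] := List.getD_eq_getElem keys 0 hilt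
    have hmemi : sl[i] ∈ d.items :=
      (PySem.List.mem_sorted d.items (fun p => p.1) false _).mp
        (by rw [← hsl]; exact List.getElem_mem hislt)
    have : d.getD (sl[i].1) 0 = sl[i].2 := by
      have := PySem.Dict.getD_of_mem_items (d := d) (k := sl[i].1) (v := sl[i].2)
        (by simpa using hmemi) hnd 0
      exact this
    rw [hgetD, hkeq i hilt, this]
  · intro j hj hji
    have := hbelow j (hlen ▸ hj) hji
    rwa [hkeq j (hlen ▸ hj)] at this
  · have := habove i hilt (le_refl i)
    rwa [hkeq i hilt] at this

-- one zipped triple: A's loop body appends exactly B's bracket string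
theorem step_eq (res : List String) (t : Int × Int × List (Int × Int))
    (ht : t.1 < 0 ∨ t.2.2 ≠ []) :
    calcStep res t = res ++ [calcBracket t.1 t.2.1 (PySem.Dict.ofList t.2.2)] := by
  obtain ⟨s, b, pairs⟩ := t
  simp only [calcStep, calcBracket]
  by_cases hs : s < 0
  · simp [hs]
  · simp only [if_neg hs]
    have hne : pairs ≠ [] := by
      rcases ht with h | h
      · exact absurd h hs
      · exact h
    have hks : (PySem.Dict.ofList pairs).keys = PySem.Set.ofList (pairs.map Prod.fst) := by
      show ((pairs.foldl (fun d q => d.insert q.1 q.2) PySem.Dict.empty)).keys = _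
      rw [PySem.Dict.keys_foldl_insert_key pairs Prod.fst (fun _ q => q.2) PySem.Dict.empty]
      simp [PySem.Set.update_nil_left]
    have hkne : (PySem.Dict.ofList pairs).keys ≠ [] := by
      intro hk
      rcases pairs with _ | ⟨p, rest⟩
      · exact hne rfl
      · have hmem : p.1 ∈ (PySem.Dict.ofList (p :: rest)).keys := by
          rw [hks, PySem.Set.mem_ofList]; simp
        rw [hk] at hmem
        simp at hmem
    cases hmx : PySem.List.max? (PySem.Dict.ofList pairs).keys (fun k => k) with
    | none => exact absurd ((PySem.List.max?_eq_none_iff _ _).mp hmx) hkne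
    | some m =>
      by_cases hgt : s > m
      · simp [hgt]
      · simp only [if_neg hgt]
        rw [scan_eq_bracket s b pairs m hmx (not_lt.mp hgt)]

-- ===== VERDICT (by name: the statement is the Claim_ definition above) =====
theorem calc_py_spec : Claim_equal_calc_py := by
  intro score base deadline _ hpre
  unfold Spec_calc_py calc_py calc_py_alt
  have : ∀ (l : List (Int × Int × List (Int × Int))) (acc : List String),
      (∀ t ∈ l, t.1 < 0 ∨ t.2.2 ≠ []) →
      l.foldl calcStep acc = acc ++ l.map (fun t => calcBracket t.1 t.2.1 (PySem.Dict.ofList t.2.2)) := by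
    intro l
    induction l with
    | nil => intro acc _; simp
    | cons t rest ih =>
      intro acc hl
      simp only [List.foldl_cons, List.map_cons]
      rw [step_eq acc t (hl t (by simp)), ih _ (fun u hu => hl u (by simp [hu]))]
      simp
  simpa using this (score.zip (base.zip deadline)) [] hpre
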